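-- pv_equiv track=rewrite | github.com/hyeon-marina/coding-test-preparation | Python3/프로그래머스/5/81305. 시험장 나누기/시험장 나누기.py | solution
-- ===== SOURCE A (Python) =====
-- def solution(k, num, links):
--     n = len(num)
--     # 부모가 없는 노드 = 루트 찾기
--     parent = [-1] * n
--     for i in range(n):
--         l, r = links[i]
--         if l != -1:
--             parent[l] = i
--         if r != -1:
--             parent[r] = i
--     root = parent.index(-1)
--
--     # DFS 후위순회로 각 노드별 (인원합, 그룹개수) 반환
--     def dfs(node, limit):
--         left, right = links[node]
--         sum_left, cnt_left = (dfs(left, limit) if left != -1 else (0, 0))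
--         sum_right, cnt_right = (dfs(right, limit) if right != -1 else (0, 0))
--
--         total_people = num[node] + sum_left + sum_right
--
--         # 경우 1: 자식 둘 + 나까지 같이 그룹 가능
--         if total_people <= limit:
--             return total_people, cnt_left + cnt_right
--         # 경우 2: 자식 중 하나만 + 나 그룹
--         if num[node] + min(sum_left, sum_right) <= limit:
--             # 그룹 하나 더 생긴다: 기존 자식들 그룹 개수만큼 + (나 포함한 그룹 1개)
--             # 자식 그룹 개수 합이 cnt_left+cnt_right
--             # 여기서 묶는 자식의 그룹 개수 변화 없음
--             return num[node] + min(sum_left, sum_right), cnt_left + cnt_right + 1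
--         # 경우 3: 둘 다 못 묶음 → 나만 새로운 그룹
--         return num[node], cnt_left + cnt_right + 2
--
--     # 이분탐색
--     left = max(num)
--     right = sum(num)
--     answer = right
--     while left <= right:
--         mid = (left + right) // 2
--         _, groups = dfs(root, mid)
--         # 그룹 개수 값은 ‘groups’+1 그룹이 사용됨 (dfs는 새 그룹 생길 때 +2 등)
--         if groups + 1 <= k:
--             answer = mid
--             right = mid - 1
--         else:
--             left = mid + 1
--
--     return answer
-- ===== SOURCE B (Python) =====
-- def solution(k, num, links):
--     n = len(num)
--     # root finding kept as in A: node with no parent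
--     parent = [-1] * n
--     for i in range(n):
--         l, r = links[i]
--         if l != -1:
--             parent[l] = i
--         if r != -1:
--             parent[r] = i
--     root = parent.index(-1)
--
--     # Materialize the tree as nested tuples (value, left, right); the
--     # per-limit evaluation then never touches num/links again.  Built only
--     # when the search range is nonempty (it is the only consumer).
--     def build(i):
--         l, r = links[i]
--         return (num[i],
--                 build(l) if l != -1 else None,
--                 build(r) if r != -1 else None)
--
--     def groups(t, limit):
--         if t is None:
--             return (0, 0)
--         v, lt, rt = t
--         sl, cl = groups(lt, limit)
--         sr, cr = groups(rt, limit)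
--         total = v + sl + sr
--         if total <= limit:
--             return total, cl + cr
--         m = sl if sl <= sr else sr
--         if v + m <= limit:
--             return v + m, cl + cr + 1
--         return v, cl + cr + 2
--
--     def search(left, right, answer):
--         if left > right:
--             return answer
--         mid = (left + right) // 2
--         if groups(tree, mid)[1] + 1 <= k:
--             return search(left, mid - 1, mid)
--         return search(mid + 1, right, answer)
--
--     left, right = max(num), sum(num)
--     answer = right
--     if left <= right:
--         tree = build(root)
--         answer = search(left, right, answer)
--     return answer
-- ===== Notes on version B (the rewrite author's own statement) =====
-- stated objective: alternative
-- what changed: B materializes the tree once as a nested (value,left,right) structure and evaluates the greedy by structural recursion on it inside a recursive binary search, instead of A's per-limit index-based dfs over num/links inside a while loop.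
import Mathlib
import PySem

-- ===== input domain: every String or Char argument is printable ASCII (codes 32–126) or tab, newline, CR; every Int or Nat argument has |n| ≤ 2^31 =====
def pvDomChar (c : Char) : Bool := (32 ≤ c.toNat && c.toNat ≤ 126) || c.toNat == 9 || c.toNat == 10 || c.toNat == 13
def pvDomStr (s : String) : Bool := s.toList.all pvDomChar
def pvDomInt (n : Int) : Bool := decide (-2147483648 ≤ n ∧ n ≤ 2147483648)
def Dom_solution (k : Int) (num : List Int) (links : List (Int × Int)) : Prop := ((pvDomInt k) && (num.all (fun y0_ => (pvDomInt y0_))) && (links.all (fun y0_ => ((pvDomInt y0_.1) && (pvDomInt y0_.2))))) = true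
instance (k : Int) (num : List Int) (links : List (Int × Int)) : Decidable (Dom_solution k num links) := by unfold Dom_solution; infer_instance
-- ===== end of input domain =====

-- B materializes the tree once as an inductive structure and evaluates the greedy by structural
-- recursion on it inside a recursive binary search, instead of A's per-limit index-based dfs;
-- same results (objective: alternative decomposition, no speed claim).


-- ===== PORT A =====
-- parent/root computation, identical lines in Source A and Source B (shared helper)
def rootOf (num : List Int) (links : List (Int × Int)) : Int :=
  let n := num.length
  let parent := (List.range n).foldl (fun p i =>
      let lr := (PySem.List.pyGet? links (i : Int)).getD (-1, -1)
      let p := if lr.1 ≠ -1 then PySem.List.pySetD p lr.1 (i : Int) else p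
      if lr.2 ≠ -1 then PySem.List.pySetD p lr.2 (i : Int) else p)
    (List.replicate n (-1 : Int))
  (((PySem.List.index? parent (-1)).getD 0 : Nat) : Int)   -- getD 0: Pre_ guarantees a root exists

-- the three greedy cases of A's dfs
def stepA (v limit : Int) (L R : Int × Int) : Int × Int :=
  if v + L.1 + R.1 ≤ limit then (v + L.1 + R.1, L.2 + R.2)
  else if v + min L.1 R.1 ≤ limit then (v + min L.1 R.1, L.2 + R.2 + 1)
  else (v, L.2 + R.2 + 2)

-- A's recursive dfs(node, limit); fuel 2*num.length+2 bounds the recursion depth on Pre_ inputs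
def dfsA (num : List Int) (links : List (Int × Int)) (limit : Int) : Nat → Int → Int × Int
  | 0, _ => (0, 0)
  | f + 1, node =>
    let lr := (PySem.List.pyGet? links node).getD (-1, -1)
    let L := if lr.1 ≠ -1 then dfsA num links limit f lr.1 else (0, 0)
    let R := if lr.2 ≠ -1 then dfsA num links limit f lr.2 else (0, 0)
    stepA ((PySem.List.pyGet? num node).getD 0) limit L R

-- A's while left <= right binary search
def bsA (k : Int) (num : List Int) (links : List (Int × Int)) (root left right answer : Int) : Int :=
  if h : left ≤ right then
    let mid := PySem.Int.floordiv (left + right) 2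
    if (dfsA num links mid (2 * num.length + 2) root).2 + 1 ≤ k then
      bsA k num links root left (mid - 1) mid
    else
      bsA k num links root (mid + 1) right answer
  else answer
termination_by (right + 1 - left).toNat
decreasing_by
  · obtain ⟨h1, h2⟩ := PySem.Int.floordiv_two_mid_bounds h; omega
  · obtain ⟨h1, h2⟩ := PySem.Int.floordiv_two_mid_bounds h; omega

def solution (k : Int) (num : List Int) (links : List (Int × Int)) : Int :=
  bsA k num links (rootOf num links)
    ((PySem.List.max? num (fun x => x)).getD 0) num.sum num.sum

-- ===== PORT B =====
inductive PTree : Type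
  | nil : PTree
  | node : Int → PTree → PTree → PTree

-- B's build(i): materialize the tree once (same fuel bound for termination)
def buildT (num : List Int) (links : List (Int × Int)) : Nat → Int → PTree
  | 0, _ => .nil
  | f + 1, node =>
    let lr := (PySem.List.pyGet? links node).getD (-1, -1)
    .node ((PySem.List.pyGet? num node).getD 0)
      (if lr.1 ≠ -1 then buildT num links f lr.1 else .nil)
      (if lr.2 ≠ -1 then buildT num links f lr.2 else .nil)

-- B's three cases (m = sl if sl <= sr else sr)
def stepB (v limit : Int) (L R : Int × Int) : Int × Int :=
  if v + L.1 + R.1 ≤ limit then (v + L.1 + R.1, L.2 + R.2)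
  else if v + (if L.1 ≤ R.1 then L.1 else R.1) ≤ limit then
    (v + (if L.1 ≤ R.1 then L.1 else R.1), L.2 + R.2 + 1)
  else (v, L.2 + R.2 + 2)

-- B's groups(t, limit): structural recursion on the materialized tree
def groupsT (limit : Int) : PTree → Int × Int
  | .nil => (0, 0)
  | .node v l r => stepB v limit (groupsT limit l) (groupsT limit r)

-- B's recursive search(left, right, answer)
def bsB (k : Int) (t : PTree) (left right answer : Int) : Int :=
  if h : left ≤ right then
    let mid := PySem.Int.floordiv (left + right) 2
    if (groupsT mid t).2 + 1 ≤ k then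
      bsB k t left (mid - 1) mid
    else
      bsB k t (mid + 1) right answer
  else answer
termination_by (right + 1 - left).toNat
decreasing_by
  · obtain ⟨h1, h2⟩ := PySem.Int.floordiv_two_mid_bounds h; omega
  · obtain ⟨h1, h2⟩ := PySem.Int.floordiv_two_mid_bounds h; omega

def solution_alt (k : Int) (num : List Int) (links : List (Int × Int)) : Int :=
  let left := (PySem.List.max? num (fun x => x)).getD 0
  let right := num.sum
  if left ≤ right then
    bsB k (buildT num links (2 * num.length + 2) (rootOf num links)) left right right
  else right

-- ===== PRECONDITION & SPEC =====
-- children of a node v as Python's dfs sees them (links[v] with negative-index wraparound)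
def succsPre (links : List (Int × Int)) (v : Int) : List Int :=
  let lr := (PySem.List.pyGet? links v).getD (-1, -1)
  [lr.1, lr.2].filter (fun c => c != -1)

-- nodes reachable from a frontier in at most s steps of the child relation
def reachN (links : List (Int × Int)) : Nat → List Int → List Int
  | 0, fr => fr
  | s + 1, fr => reachN links s (PySem.Set.ofList (fr ++ fr.flatMap (succsPre links)))

-- indices of parent[] written by A's parent loop (with negative-index wraparound)
def coveredPre (n : Nat) (links : List (Int × Int)) : List Int :=
  (List.range n).flatMap (fun i =>
    let lr := (PySem.List.pyGet? links (i : Int)).getD (-1, -1)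
    ([lr.1, lr.2].filter (fun c => c != -1)).map (fun c => if 0 ≤ c then c else (n : Int) + c))

-- the root A picks: first index whose parent slot stays -1
def rootPre (n : Nat) (links : List (Int × Int)) : Int :=
  match (List.range n).find? (fun j => !((coveredPre n links).contains (j : Int))) with
  | some j => (j : Int)
  | none => 0

-- Pre_ = the inputs on which A returns normally: num nonempty, a link pair for each node, the
-- first num.length link components are -1 or in Python's index range, some parent slot stays -1
-- (else ValueError), and — unless max(num) > sum(num) empties the search range so the traversal
-- never runs — every node reachable from the root is indexable and on no cycle
-- (else IndexError/RecursionError).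
def Pre_solution (k : Int) (num : List Int) (links : List (Int × Int)) : Prop :=
  num ≠ [] ∧ num.length ≤ links.length ∧
  (∀ i ∈ List.range num.length,
    ∀ c ∈ [((PySem.List.pyGet? links (i : Int)).getD (-1, -1)).1,
           ((PySem.List.pyGet? links (i : Int)).getD (-1, -1)).2],
      c = -1 ∨ (-(num.length : Int) ≤ c ∧ c < (num.length : Int))) ∧
  (∃ j ∈ List.range num.length, (j : Int) ∉ coveredPre num.length links) ∧
  ((PySem.List.max? num (fun x => x)).getD 0 > num.sum ∨
   ∀ v ∈ reachN links (2 * num.length + 1) [rootPre num.length links],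
    (-(num.length : Int) ≤ v ∧ v < (num.length : Int)) ∧
    v ∉ reachN links (2 * num.length) (succsPre links v))
instance (k : Int) (num : List Int) (links : List (Int × Int)) : Decidable (Pre_solution k num links) := by unfold Pre_solution; infer_instance

def pvWitness_solution : Int × List Int × (List (Int × Int)) := (2, [1, 2, 3], [(1, 2), (-1, -1), (-1, -1)])

def Spec_solution (k : Int) (num : List Int) (links : List (Int × Int)) (out : Int) : Prop := out = solution_alt k num links
instance (k : Int) (num : List Int) (links : List (Int × Int)) (out : Int) : Decidable (Spec_solution k num links out) := by unfold Spec_solution; infer_instance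

-- ===== CLAIM (what is proved, stated in full; the proofs are below) =====
def Claim_equal_solution : Prop := ∀ (k : Int) (num : List Int) (links : List (Int × Int)), Dom_solution k num links → Pre_solution k num links → Spec_solution k num links (solution k num links)

-- ===== LEMMAS AND PROOFS =====
theorem stepB_eq_stepA (v limit : Int) (L R : Int × Int) : stepB v limit L R = stepA v limit L R := by
  simp [stepA, stepB, min_def]

theorem groups_build (num : List Int) (links : List (Int × Int)) :
    ∀ (f : Nat) (limit node : Int),
      groupsT limit (buildT num links f node) = dfsA num links limit f node := by
  intro f
  induction f with
  | zero => intro limit node; rfl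
  | succ f ih =>
    intro limit node
    simp only [buildT, dfsA, groupsT, stepB_eq_stepA]
    split_ifs <;> simp [ih, groupsT]

theorem bs_eq (k : Int) (num : List Int) (links : List (Int × Int)) (root : Int) :
    ∀ (left right answer : Int),
      bsA k num links root left right answer
        = bsB k (buildT num links (2 * num.length + 2) root) left right answer := by
  intro left right answer
  fun_induction bsA k num links root left right answer with
  | case1 left right answer h mid hc ih =>
    rw [bsB]
    rw [dif_pos h]
    simp only [groups_build]
    rw [if_pos hc]
    exact ih
  | case2 left right answer h mid hc ih =>
    rw [bsB]
    rw [dif_pos h]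
    simp only [groups_build]
    rw [if_neg hc]
    exact ih
  | case3 left right answer h =>
    rw [bsB, dif_neg h]

-- ===== VERDICT (by name: the statement is the Claim_ definition above) =====
theorem solution_spec : Claim_equal_solution := by
  intro k num links _ _
  show solution k num links = solution_alt k num links
  simp only [solution, solution_alt]
  by_cases h : (PySem.List.max? num (fun x => x)).getD 0 ≤ num.sum
  · rw [if_pos h]
    exact bs_eq k num links (rootOf num links) _ _ _
  · rw [if_neg h, bsA, dif_neg h]
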